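-- pv_equiv track=rewrite | github.com/nishio/atcoder | arc108/b.py | solve
-- ===== SOURCE A (Python) =====
-- def solve(N, S):
--     i = 0
--     state = [0]
--     ret = N
--     while i < N:
--         # debug(i, S[i], state, msg=":i, state")
--         if state[-1] == 0:
--             if S[i] == "f":
--                 state.append(1)
--         elif state[-1] == 1:
--             if S[i] == "o":
--                 state[-1] = 2
--             elif S[i] == "f":
--                 state.append(1)
--             else:
--                 state = [0]
--         elif state[-1] == 2:
--             if S[i] == "x":
--                 state.pop()
--                 ret -= 3
--             elif S[i] == "f":
--                 state.append(1)
--             else: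
--                 state = [0]
--         i += 1
--     return ret
-- ===== SOURCE B (Python) =====
-- def solve(N, S):
--     stack = []
--     fox = 0
--     for i in range(N):
--         stack.append(S[i])
--         if stack[-3:] == ['f', 'o', 'x']:
--             del stack[-3:]
--             fox += 1
--     return N - 3 * fox
-- ===== Notes on version B (the rewrite author's own statement) =====
-- stated objective: simpler
-- what changed: Replaces A's integer match-state stack machine (states 0/1/2 with reset/pop transitions) by a plain character stack: push each character, delete the last three whenever they read 'fox' while counting removals, and return N minus three per removal.
import Mathlib
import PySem

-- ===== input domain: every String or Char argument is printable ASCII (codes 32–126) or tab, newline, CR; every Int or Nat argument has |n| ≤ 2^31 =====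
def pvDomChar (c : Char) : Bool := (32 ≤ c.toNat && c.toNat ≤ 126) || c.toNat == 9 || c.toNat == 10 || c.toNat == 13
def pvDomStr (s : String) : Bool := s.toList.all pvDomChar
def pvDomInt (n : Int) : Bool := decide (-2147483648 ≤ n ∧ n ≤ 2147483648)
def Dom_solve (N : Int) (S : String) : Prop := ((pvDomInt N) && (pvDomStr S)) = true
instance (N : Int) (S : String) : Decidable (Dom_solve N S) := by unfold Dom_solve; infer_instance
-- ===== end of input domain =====

-- B replaces A's integer match-state stack machine by a plain character stack with a
-- last-three-equal-"fox" check and a removal counter; same single pass, same cost.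

-- ===== PORT A =====
-- the body of A's while-loop (state stack is kept top-first: Python state[-1] is the head)
def solveStepA (S : String) (st : List Int × Int) (i : Int) : List Int × Int :=
  match PySem.Str.pyGet? S i with
  | none => st          -- Python raises IndexError here; excluded by Pre_solve
  | some c =>
    match st with
    | (state, ret) =>
      match state with
      | [] => (state, ret)   -- unreachable: Python's state always contains the bottom 0
      | top :: rest =>
        if top = 0 then
          (if c = 'f' then (1 :: top :: rest, ret) else (top :: rest, ret))
        else if top = 1 then
          (if c = 'o' then (2 :: rest, ret)
           else if c = 'f' then (1 :: top :: rest, ret)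
           else ([0], ret))
        else
          (if c = 'x' then (rest, ret - 3)
           else if c = 'f' then (1 :: top :: rest, ret)
           else ([0], ret))

def solve (N : Int) (S : String) : Int :=
  ((PySem.List.pyRange 0 N 1).foldl (solveStepA S) ([0], N)).2

-- ===== PORT B =====
-- the body of B's for-loop (char stack kept top-first: Python stack[-1] is the head,
-- so Python's suffix stack[-3:] == ['f','o','x'] is the head-first prefix ['x','o','f'])
def solveStepB (S : String) (st : List Char × Int) (i : Int) : List Char × Int :=
  match PySem.Str.pyGet? S i with
  | none => st          -- Python raises IndexError here; excluded by Pre_solve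
  | some c =>
    match st with
    | (stack, fox) =>
      let s := c :: stack
      if s.take 3 = ['x', 'o', 'f'] then (s.drop 3, fox + 1) else (s, fox)

def solve_alt (N : Int) (S : String) : Int :=
  N - 3 * ((PySem.List.pyRange 0 N 1).foldl (solveStepB S) ([], 0)).2

-- ===== PRECONDITION & SPEC =====
-- Pre_ excludes exactly N > len(S), where both Pythons raise IndexError at S[len(S)].
def Pre_solve (N : Int) (S : String) : Prop := N ≤ (S.toList.length : Int)
instance (N : Int) (S : String) : Decidable (Pre_solve N S) := by unfold Pre_solve; infer_instance
def pvWitness_solve : Int × String := (3, "fox")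

def Spec_solve (N : Int) (S : String) (out : Int) : Prop := out = solve_alt N S
instance (N : Int) (S : String) (out : Int) : Decidable (Spec_solve N S out) := by unfold Spec_solve; infer_instance

-- ===== CLAIM (what is proved, stated in full; the proofs are below) =====
def Claim_equal_solve : Prop := ∀ (N : Int) (S : String), Dom_solve N S → Pre_solve N S → Spec_solve N S (solve N S)

-- ===== LEMMAS AND PROOFS =====

-- A's loop body once the character S[i] has been fetched
def stepAc (st : List Int × Int) (c : Char) : List Int × Int :=
  match st with
  | (state, ret) =>
    match state with
    | [] => (state, ret)
    | top :: rest =>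
      if top = 0 then
        (if c = 'f' then (1 :: top :: rest, ret) else (top :: rest, ret))
      else if top = 1 then
        (if c = 'o' then (2 :: rest, ret)
         else if c = 'f' then (1 :: top :: rest, ret)
         else ([0], ret))
      else
        (if c = 'x' then (rest, ret - 3)
         else if c = 'f' then (1 :: top :: rest, ret)
         else ([0], ret))

-- B's loop body once the character S[i] has been fetched
def stepBc (st : List Char × Int) (c : Char) : List Char × Int :=
  match st with
  | (stack, fox) =>
    let s := c :: stack
    if s.take 3 = ['x', 'o', 'f'] then (s.drop 3, fox + 1) else (s, fox)

-- well-formedness of A's state stack: entries 1/2 above a single bottom 0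
def WF : List Int → Prop
  | [] => False
  | [x] => x = 0
  | x :: r => (x = 1 ∨ x = 2) ∧ WF r

-- the "dead" (never again removable) lower part of B's char stack
def Safe (d : List Char) : Prop := d.head? ≠ some 'f' ∧ d.take 2 ≠ ['o', 'f']

-- the characters of B's stack that A's state stack still tracks (head-first)
def enc : List Int → List Char
  | [] => []
  | t :: r => if t = 1 then 'f' :: enc r else if t = 2 then 'o' :: 'f' :: enc r else []

lemma safe_push (d : List Char) (c : Char) (hs : Safe d) (hc : c ≠ 'f') : Safe (c :: d) := by
  cases d with
  | nil => simp [Safe, hc]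
  | cons a d =>
    have ha : a ≠ 'f' := by simpa using hs.1
    simp [Safe, hc]
    intro _; exact ha

lemma step_sim (state : List Int) (d : List Char) (ret fox : Int) (c : Char)
    (hw : WF state) (hs : Safe d) :
    ∃ d', WF (stepAc (state, ret) c).1 ∧ Safe d' ∧
      (stepBc (enc state ++ d, fox) c).1 = enc (stepAc (state, ret) c).1 ++ d' ∧
      (stepAc (state, ret) c).2 + 3 * (stepBc (enc state ++ d, fox) c).2 = ret + 3 * fox := by
  cases state with
  | nil => simp [WF] at hw
  | cons t rest =>
    cases rest with
    | nil =>
      have ht : t = 0 := by simpa [WF] using hw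
      subst ht
      by_cases hc : c = 'f'
      · subst hc
        refine ⟨d, by simp [stepAc, WF], hs, ?_, ?_⟩ <;> simp [stepAc, stepBc, enc]
      · have hcond : ¬(c = 'x' ∧ List.take 2 d = ['o', 'f']) := fun h => hs.2 h.2
        refine ⟨c :: d, by simp [stepAc, hc]; exact hw, safe_push d c hs hc, ?_, ?_⟩ <;>
          simp [stepAc, stepBc, enc, hc, hcond]
    | cons a rest =>
      obtain ⟨ht12, hwr⟩ := hw
      rcases ht12 with ht | ht <;> subst ht
      · -- top = 1
        by_cases ho : c = 'o'
        · subst ho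
          refine ⟨d, ⟨Or.inr rfl, hwr⟩, hs, ?_, ?_⟩ <;> simp [stepAc, stepBc, enc]
        · by_cases hf : c = 'f'
          · subst hf
            refine ⟨d, ⟨Or.inl rfl, Or.inl rfl, hwr⟩, hs, ?_, ?_⟩ <;>
              simp [stepAc, stepBc, enc]
          · refine ⟨c :: 'f' :: enc (a :: rest) ++ d, by simp [stepAc, ho, hf, WF], ?_, ?_, ?_⟩
            · exact ⟨by simp [hf], by simp; intro h; exact absurd h ho⟩
            · simp [stepAc, stepBc, enc, ho, hf]
            · simp [stepAc, stepBc, enc, ho, hf]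
      · -- top = 2
        by_cases hx : c = 'x'
        · subst hx
          refine ⟨d, by simpa [stepAc] using hwr, hs, ?_, ?_⟩
          · simp [stepAc, stepBc, enc]
          · simp [stepAc, stepBc, enc]; omega
        · by_cases hf : c = 'f'
          · subst hf
            refine ⟨d, ⟨Or.inl rfl, Or.inr rfl, hwr⟩, hs, ?_, ?_⟩ <;>
              simp [stepAc, stepBc, enc]
          · refine ⟨c :: 'o' :: 'f' :: enc (a :: rest) ++ d, by simp [stepAc, hx, hf, WF], ?_, ?_, ?_⟩
            · exact ⟨by simp [hf], by simp⟩
            · simp [stepAc, stepBc, enc, hx, hf]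
            · simp [stepAc, stepBc, enc, hx, hf]

lemma main_sim (cs : List Char) : ∀ (state : List Int) (d : List Char) (ret fox : Int),
    WF state → Safe d →
    ∃ d', WF (cs.foldl stepAc (state, ret)).1 ∧ Safe d' ∧
      (cs.foldl stepBc (enc state ++ d, fox)).1 = enc (cs.foldl stepAc (state, ret)).1 ++ d' ∧
      (cs.foldl stepAc (state, ret)).2 + 3 * (cs.foldl stepBc (enc state ++ d, fox)).2
        = ret + 3 * fox := by
  induction cs with
  | nil => intro state d ret fox hw hs; exact ⟨d, hw, hs, rfl, rfl⟩
  | cons c cs ih =>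
    intro state d ret fox hw hs
    obtain ⟨d₁, hw₁, hs₁, heq₁, hnum₁⟩ := step_sim state d ret fox c hw hs
    simp only [List.foldl_cons]
    cases hp : stepAc (state, ret) c with
    | mk st₁ ret₁ =>
      cases hq : stepBc (enc state ++ d, fox) c with
      | mk stk₁ fox₁ =>
        rw [hp] at hw₁ heq₁ hnum₁
        rw [hq] at heq₁ hnum₁
        simp only at heq₁ hnum₁
        subst heq₁
        obtain ⟨d₂, hw₂, hs₂, heq₂, hnum₂⟩ := ih st₁ d₁ ret₁ fox₁ hw₁ hs₁
        exact ⟨d₂, hw₂, hs₂, heq₂, by omega⟩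

-- A's fold over range(N) reading S[i] is the fold of stepAc over the first N characters
lemma bridgeA (S : String) : ∀ (n k : Nat) (st : List Int × Int), k + n ≤ S.toList.length →
    (PySem.List.pyRange (k : Int) ((k : Int) + (n : Int)) 1).foldl (solveStepA S) st
      = ((S.toList.drop k).take n).foldl stepAc st := by
  intro n
  induction n with
  | zero => intro k st h; simp
  | succ n ih =>
    intro k st h
    have hk : (k : Int) < (k : Int) + ((n + 1 : Nat) : Int) := by push_cast; omega
    rw [PySem.List.pyRange_one_cons hk]
    simp only [List.foldl_cons]
    have hlt : k < S.toList.length := by omega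
    have hstep : solveStepA S st (k : Int) = stepAc st (S.toList[k]) := by
      obtain ⟨a, b⟩ := st; simp [solveStepA, stepAc, List.getElem?_eq_getElem hlt]
    rw [hstep]
    have harith : (k : Int) + 1 = ((k + 1 : Nat) : Int) := by push_cast; ring
    have harith2 : (k : Int) + ((n + 1 : Nat) : Int) = ((k + 1 : Nat) : Int) + (n : Int) := by
      push_cast; ring
    rw [harith, harith2, ih (k + 1) _ (by omega)]
    rw [List.drop_eq_getElem_cons hlt, List.take_succ_cons, List.foldl_cons]

-- B's fold over range(N) reading S[i] is the fold of stepBc over the first N characters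
lemma bridgeB (S : String) : ∀ (n k : Nat) (st : List Char × Int), k + n ≤ S.toList.length →
    (PySem.List.pyRange (k : Int) ((k : Int) + (n : Int)) 1).foldl (solveStepB S) st
      = ((S.toList.drop k).take n).foldl stepBc st := by
  intro n
  induction n with
  | zero => intro k st h; simp
  | succ n ih =>
    intro k st h
    have hk : (k : Int) < (k : Int) + ((n + 1 : Nat) : Int) := by push_cast; omega
    rw [PySem.List.pyRange_one_cons hk]
    simp only [List.foldl_cons]
    have hlt : k < S.toList.length := by omega
    have hstep : solveStepB S st (k : Int) = stepBc st (S.toList[k]) := by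
      obtain ⟨a, b⟩ := st; simp [solveStepB, stepBc, List.getElem?_eq_getElem hlt]
    rw [hstep]
    have harith : (k : Int) + 1 = ((k + 1 : Nat) : Int) := by push_cast; ring
    have harith2 : (k : Int) + ((n + 1 : Nat) : Int) = ((k + 1 : Nat) : Int) + (n : Int) := by
      push_cast; ring
    rw [harith, harith2, ih (k + 1) _ (by omega)]
    rw [List.drop_eq_getElem_cons hlt, List.take_succ_cons, List.foldl_cons]

-- ===== VERDICT (by name: the statement is the Claim_ definition above) =====
theorem solve_spec : Claim_equal_solve := by
  intro N S _ hp
  unfold Spec_solve solve solve_alt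
  by_cases h0 : 0 ≤ N
  · have hb := bridgeA S N.toNat 0 ([0], N) (by unfold Pre_solve at hp; omega)
    have hb' := bridgeB S N.toNat 0 ([], 0) (by unfold Pre_solve at hp; omega)
    have hNN : ((N.toNat : Nat) : Int) = N := by omega
    simp only [Nat.cast_zero, zero_add, List.drop_zero, hNN] at hb hb'
    rw [hb, hb']
    obtain ⟨d', hw', hs', heq, hnum⟩ :=
      main_sim (S.toList.take N.toNat) [0] [] N 0 (by simp [WF]) (by simp [Safe])
    simp [enc] at heq hnum
    omega
  · have hr : PySem.List.pyRange 0 N 1 = [] := by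
      simp [PySem.List.pyRange_one]
      omega
    rw [hr]
    simp
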